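-- pv_equiv track=rewrite | github.com/XiushangWu/DGVTI-refined | Extract data with 3 missing pattern_2.py | extract_mmsi_from_filename
-- ===== SOURCE A (Python) =====
-- def extract_mmsi_from_filename(filename):
--     parts = filename.split(" ")
--     for i, part in enumerate(parts):
--         if part == 'MMSI' and i + 1 < len(parts):
--             mmsi = parts[i + 1]
--             if mmsi.isdigit() and len(mmsi) == 9:
--                 return mmsi
--     return "unknown_MMSI"
-- ===== SOURCE B (Python) =====
-- def extract_mmsi_from_filename(filename):
--     # Single left-to-right character scan over the raw filename: no splitting,
--     # no token list.  A hit is a space-delimited token "MMSI" followed by a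
--     # space-delimited token of exactly 9 digit characters.
--     s = filename
--     n = len(s)
--     i = 0
--     while i < n:
--         if (i == 0 or s[i - 1] == ' ') and s.startswith('MMSI ', i):
--             j = i + 5
--             k = j
--             while k < n and s[k].isdigit():
--                 k += 1
--             if k - j == 9 and (k == n or s[k] == ' '):
--                 return s[j:k]
--         i += 1
--     return "unknown_MMSI"
-- ===== Notes on version B (the rewrite author's own statement) =====
-- stated objective: alternative
-- what changed: A splits the filename into a token list and scans it with an enumerate index plus parts[i+1] lookups; B never splits: it makes a single left-to-right character scan over the raw string, detecting the MMSI marker at a token boundary and then measuring the following digit run.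
import Mathlib
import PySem

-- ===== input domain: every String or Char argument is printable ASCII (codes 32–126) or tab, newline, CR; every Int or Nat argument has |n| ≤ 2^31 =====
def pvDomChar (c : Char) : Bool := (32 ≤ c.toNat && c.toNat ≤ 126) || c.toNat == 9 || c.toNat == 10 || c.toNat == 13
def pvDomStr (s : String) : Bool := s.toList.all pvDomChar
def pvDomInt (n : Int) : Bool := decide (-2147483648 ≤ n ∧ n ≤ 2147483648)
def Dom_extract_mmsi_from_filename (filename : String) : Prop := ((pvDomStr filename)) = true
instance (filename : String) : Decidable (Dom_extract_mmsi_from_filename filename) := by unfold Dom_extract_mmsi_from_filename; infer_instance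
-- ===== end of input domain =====

-- B replaces A's split-into-token-list + indexed scan by a single left-to-right
-- character scan over the raw filename (objective: alternative).

-- ===== PORT A =====
-- A's for-loop with early return, ported as the obvious structural recursion over the
-- token list carrying the running enumerate index i (as a Nat, used as the Int i in the code).
def pvGoA (full : List String) : List String → Nat → String
  | [], _ => "unknown_MMSI"
  | part :: rest, i =>
    if part = "MMSI" ∧ (i : Int) + 1 < (full.length : Int) then
      match PySem.List.pyGet? full ((i : Int) + 1) with
      | some mmsi =>
        if PySem.Str.strIsdigit mmsi ∧ PySem.Str.len mmsi = 9 then mmsi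
        else pvGoA full rest (i + 1)
      | none => pvGoA full rest (i + 1)
    else pvGoA full rest (i + 1)

def extract_mmsi_from_filename (filename : String) : String :=
  let parts := (PySem.Str.split? filename " ").getD []   -- sep " " is nonempty: split? is always `some`
  pvGoA parts parts 0

-- ===== PORT B =====
-- Source B's inner `while k < n and s[k].isdigit(): k += 1` (length of the digit run at j).
def pvDigitRun : List Char → Nat
  | [] => 0
  | c :: cs => if PySem.Chars.isdigit c then pvDigitRun cs + 1 else 0

-- Source B's outer `while i < n` loop, ported as structural recursion on the remaining
-- characters s[i:] (i ↦ drop i); `atStart` is Source B's `i == 0 or s[i-1] == ' '`,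
-- the prefix test is `s.startswith('MMSI ', i)`, and `some (rest.take 9)` is `return s[j:k]`.
def pvScanB : List Char → Bool → Option (List Char)
  | [], _ => none
  | c :: cs, atStart =>
    if atStart ∧ ['M','M','S','I',' '].isPrefixOf (c :: cs) then
      let rest := (c :: cs).drop 5
      let k := pvDigitRun rest
      if k = 9 ∧ (rest.length = 9 ∨ rest[9]? = some ' ') then some (rest.take 9)
      else pvScanB cs (c = ' ')
    else pvScanB cs (c = ' ')

def extract_mmsi_from_filename_alt (filename : String) : String :=
  match pvScanB filename.toList true with
  | some ds => String.ofList ds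
  | none => "unknown_MMSI"

-- ===== PRECONDITION & SPEC =====
def Spec_extract_mmsi_from_filename (filename : String) (out : String) : Prop := out = extract_mmsi_from_filename_alt filename
instance (filename : String) (out : String) : Decidable (Spec_extract_mmsi_from_filename filename out) := by unfold Spec_extract_mmsi_from_filename; infer_instance

-- ===== CLAIM (what is proved, stated in full; the proofs are below) =====
def Claim_equal_extract_mmsi_from_filename : Prop := ∀ (filename : String), Dom_extract_mmsi_from_filename filename → Spec_extract_mmsi_from_filename filename (extract_mmsi_from_filename filename)

-- ===== LEMMAS AND PROOFS =====

-- Structural version of Python's str.split(" ") on the character list.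
def pvSplit : List Char → List (List Char)
  | [] => [[]]
  | c :: cs => if c = ' ' then [] :: pvSplit cs else (pvSplit cs).modifyHead (c :: ·)

theorem pvSplit_ne_nil (cs : List Char) : pvSplit cs ≠ [] := by
  cases cs with
  | nil => simp [pvSplit]
  | cons c cs =>
    simp only [pvSplit]
    split
    · simp
    · cases h : pvSplit cs with
      | nil => exact absurd h (pvSplit_ne_nil cs)
      | cons a l => simp

theorem pvSplit_go (fuel : Nat) (l cur : List Char) (acc : List (List Char))
    (h : l.length < fuel) :
    PySem.Chars.splitOn.go [' '] fuel l cur acc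
      = acc.reverse ++ (pvSplit l).modifyHead (fun t => cur.reverse ++ t) := by
  induction fuel generalizing l cur acc with
  | zero => omega
  | succ f ih =>
    cases l with
    | nil => simp [PySem.Chars.splitOn.go, pvSplit]
    | cons c rest =>
      by_cases hc : c = ' '
      · subst hc
        have hpre : ([' '].isPrefixOf (' ' :: rest)) = true := by simp [List.isPrefixOf]
        have : PySem.Chars.splitOn.go [' '] (f+1) (' ' :: rest) cur acc
            = PySem.Chars.splitOn.go [' '] f rest [] (cur.reverse :: acc) := by
          simp [PySem.Chars.splitOn.go, hpre]
        rw [this, ih rest [] (cur.reverse :: acc) (by simpa using Nat.lt_of_succ_lt_succ h)]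
        obtain ⟨a, t, hsp⟩ := List.exists_cons_of_ne_nil (pvSplit_ne_nil rest)
        simp [pvSplit, hsp]
      · have hpre : ([' '].isPrefixOf (c :: rest)) = false := by
          simp [List.isPrefixOf]; exact fun h' => hc h'.symm
        have : PySem.Chars.splitOn.go [' '] (f+1) (c :: rest) cur acc
            = PySem.Chars.splitOn.go [' '] f rest (c :: cur) acc := by
          simp [PySem.Chars.splitOn.go, hpre]
        rw [this, ih rest (c :: cur) acc (by simpa using Nat.lt_of_succ_lt_succ h)]
        obtain ⟨a, t, hsp⟩ := List.exists_cons_of_ne_nil (pvSplit_ne_nil rest)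
        simp [pvSplit, hc, hsp]

theorem pvSplitOn_space (cs : List Char) :
    PySem.Chars.splitOn cs [' '] = pvSplit cs := by
  have := pvSplit_go (cs.length + 1) cs [] [] (by omega)
  simp only [PySem.Chars.splitOn] at *
  rw [this]
  obtain ⟨a, t, hsp⟩ := List.exists_cons_of_ne_nil (pvSplit_ne_nil cs)
  simp [hsp]

-- A's loop as a structural two-token scan (over strings).
def pvScanAS : List String → String
  | t :: u :: rest =>
    if t = "MMSI" ∧ PySem.Str.strIsdigit u ∧ PySem.Str.len u = 9 then u
    else pvScanAS (u :: rest)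
  | _ => "unknown_MMSI"

theorem pvGoA_eq_scanAS (full : List String) (l : List String) (k : Nat)
    (hl : full.drop k = l) :
    pvGoA full l k = pvScanAS l := by
  induction l generalizing k with
  | nil => simp [pvGoA, pvScanAS]
  | cons part rest ih =>
    have hk : k < full.length := by
      by_contra hge
      have : full.drop k = [] := List.drop_eq_nil_of_le (by omega)
      rw [this] at hl; exact absurd hl.symm (by simp)
    have hdrop1 : full.drop (k + 1) = rest := by
      have := congrArg List.tail hl
      simpa [List.tail_drop] using this
    have hlen : full.length = k + 1 + rest.length := by
      have := congrArg List.length hl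
      simp [List.length_drop] at this
      omega
    cases rest with
    | nil =>
      have hcond : ¬ ((k : Int) + 1 < (full.length : Int)) := by
        rw [hlen]; simp
      simp [pvGoA, hcond, pvScanAS]
    | cons u rest' =>
      have hcond : ((k : Int) + 1 < (full.length : Int)) := by
        rw [hlen]; push_cast [List.length_cons]; omega
      have hget : PySem.List.pyGet? full ((k : Int) + 1) = some u := by
        have h1 : ((k : Int) + 1) = ((k + 1 : Nat) : Int) := by push_cast; ring
        rw [h1, PySem.List.pyGet?_natCast]
        have : full[k+1]? = (full.drop (k+1))[0]? := by
          simp [List.getElem?_drop]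
        rw [this, hdrop1]; rfl
      have hstep : pvGoA full (part :: u :: rest') k
          = if part = "MMSI" ∧ (k : Int) + 1 < (full.length : Int) then
              (match PySem.List.pyGet? full ((k : Int) + 1) with
               | some mmsi =>
                 if PySem.Str.strIsdigit mmsi ∧ PySem.Str.len mmsi = 9 then mmsi
                 else pvGoA full (u :: rest') (k + 1)
               | none => pvGoA full (u :: rest') (k + 1))
            else pvGoA full (u :: rest') (k + 1) := rfl
      rw [hstep, hget, ih _ hdrop1]
      by_cases hm : part = "MMSI"
      · rw [if_pos ⟨hm, hcond⟩]
        simp [pvScanAS, hm]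
      · rw [if_neg (by tauto)]
        simp [pvScanAS, hm]

-- A's scan on the character-list side.
def pvScanAC : List (List Char) → Option (List Char)
  | t :: u :: rest =>
    if t = ['M','M','S','I'] ∧ PySem.Chars.strIsdigit u ∧ u.length = 9 then some u
    else pvScanAC (u :: rest)
  | _ => none

theorem pvScanAS_map (l : List (List Char)) :
    pvScanAS (l.map String.ofList) = (pvScanAC l).elim "unknown_MMSI" String.ofList := by
  induction l with
  | nil => simp [pvScanAS, pvScanAC]
  | cons t rest ih =>
    cases rest with
    | nil => simp [pvScanAS, pvScanAC]
    | cons u rest' =>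
      have hmmsi : (String.ofList t = "MMSI") ↔ t = ['M','M','S','I'] := by
        constructor
        · intro h; have := congrArg String.toList h; simpa using this
        · intro h; subst h; rfl
      have hdig : PySem.Str.strIsdigit (String.ofList u) = PySem.Chars.strIsdigit u := by
        simp [PySem.Str.strIsdigit]
      have hlen : (PySem.Str.len (String.ofList u) = 9) ↔ u.length = 9 := by
        simp [PySem.Str.len]; omega
      by_cases hc : t = ['M','M','S','I'] ∧ PySem.Chars.strIsdigit u ∧ u.length = 9
      · simp [pvScanAS, pvScanAC, hc]
      · simp only [List.map_cons, pvScanAS, pvScanAC, hmmsi, hdig, hlen] at *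
        rw [if_neg (by tauto), if_neg hc]
        simpa using ih

-- == B-side bridge lemmas ==

-- the characters remaining after the first space (everything if none).
def pvAfter (cs : List Char) : List Char :=
  match cs.dropWhile (· ≠ ' ') with
  | [] => []
  | _ :: r => r

theorem pvScanB_false (cs : List Char) :
    pvScanB cs false = pvScanB (pvAfter cs) true := by
  induction cs with
  | nil => simp [pvAfter, pvScanB, List.dropWhile]
  | cons c cs ih =>
    by_cases hc : c = ' '
    · subst hc
      simp [pvScanB, pvAfter, List.dropWhile]
    · have h1 : pvScanB (c :: cs) false = pvScanB cs false := by
        simp [pvScanB, hc]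
      have h2 : pvAfter (c :: cs) = pvAfter cs := by
        simp [pvAfter, List.dropWhile, hc]
      rw [h1, h2, ih]

theorem pvSplit_shape (cs : List Char) :
    pvSplit cs = cs.takeWhile (· ≠ ' ')
      :: (match cs.dropWhile (· ≠ ' ') with
          | [] => []
          | _ :: r => pvSplit r) := by
  induction cs with
  | nil => simp [pvSplit, List.takeWhile, List.dropWhile]
  | cons c cs ih =>
    by_cases hc : c = ' '
    · subst hc; simp [pvSplit, List.takeWhile, List.dropWhile]
    · simp only [pvSplit, if_neg hc, ih, List.takeWhile, List.dropWhile]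
      simp [hc]

theorem pvDigitRun_eq (cs : List Char) :
    pvDigitRun cs = (cs.takeWhile PySem.Chars.isdigit).length := by
  induction cs with
  | nil => simp [pvDigitRun]
  | cons c cs ih =>
    by_cases hc : PySem.Chars.isdigit c
    · simp [pvDigitRun, hc, ih]
    · simp [pvDigitRun, hc]

theorem pvIsdigit_ne_space {c : Char} (h : PySem.Chars.isdigit c = true) : c ≠ ' ' := by
  intro he; subst he; exact absurd h (by decide)

-- the digit-run test of B is exactly A's token test on the first token of t,
-- and on success B's take 9 is that token.
theorem pvCheck_iff (t : List Char) (n : Nat) :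
    ((t.takeWhile PySem.Chars.isdigit).length = n ∧ (t.length = n ∨ t[n]? = some ' '))
      ↔ ((t.takeWhile (· ≠ ' ')).all PySem.Chars.isdigit ∧ (t.takeWhile (· ≠ ' ')).length = n) := by
  induction t generalizing n with
  | nil => simp
  | cons c t ih =>
    by_cases hd : PySem.Chars.isdigit c
    · have hcs : c ≠ ' ' := pvIsdigit_ne_space hd
      have e1 : (c :: t).takeWhile PySem.Chars.isdigit = c :: t.takeWhile PySem.Chars.isdigit := by
        simp [hd]
      have e2 : (c :: t).takeWhile (· ≠ ' ') = c :: t.takeWhile (· ≠ ' ') := by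
        simp [hcs]
      rw [e1, e2]
      cases n with
      | zero => simp
      | succ m =>
        simp only [List.length_cons, List.all_cons, hd, Bool.true_and, List.getElem?_cons_succ]
        constructor
        · rintro ⟨h1, h2⟩
          have hih := (ih m).mp ⟨by omega, by
            rcases h2 with h2 | h2
            · left; omega
            · right; exact h2⟩
          exact ⟨hih.1, by omega⟩
        · rintro ⟨h1, h2⟩
          have hih := (ih m).mpr ⟨h1, by omega⟩
          refine ⟨by omega, ?_⟩
          rcases hih.2 with h | h
          · left; omega
          · right; exact h
    · by_cases hcs : c = ' '
      · subst hcs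
        have e1 : (' ' :: t).takeWhile PySem.Chars.isdigit = [] := by
          simp [hd]
        have e2 : (' ' :: t).takeWhile (· ≠ ' ') = ([] : List Char) := by
          simp
        rw [e1, e2]
        cases n with
        | zero => simp
        | succ m => simp
      · have e1 : (c :: t).takeWhile PySem.Chars.isdigit = [] := by
          simp [hd]
        have e2 : (c :: t).takeWhile (· ≠ ' ') = c :: t.takeWhile (· ≠ ' ') := by
          simp [hcs]
        rw [e1, e2]
        cases n with
        | zero => simp [hcs, hd]
        | succ m => simp [hd]

theorem pvTake_eq_token (t : List Char) (n : Nat)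
    (h : (t.takeWhile (· ≠ ' ')).length = n) :
    t.take n = t.takeWhile (· ≠ ' ') := by
  have hpre := List.takeWhile_prefix (l := t) (· ≠ ' ')
  have := List.prefix_iff_eq_take.mp hpre
  rw [h] at this
  exact this.symm

-- head of a nonempty dropWhile fails the predicate.
theorem pvDropWhile_cons_head {p : Char → Bool} {l : List Char} {x : Char} {xs : List Char}
    (h : List.dropWhile p l = x :: xs) : p x = false := by
  induction l with
  | nil => simp at h
  | cons a l ih =>
    rw [List.dropWhile_cons] at h
    by_cases hp : p a
    · rw [if_pos hp] at h; exact ih h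
    · rw [if_neg hp] at h
      obtain ⟨h1, -⟩ := List.cons.injEq .. |>.mp h
      rw [← h1]; simpa using hp

-- Main bridge: B's character scan computes exactly A's scan of the split tokens.
theorem pvScanB_eq_scanAC (cs : List Char) :
    pvScanB cs true = pvScanAC (pvSplit cs) := by
  cases hcs : cs with
  | nil => simp [pvScanB, pvSplit, pvScanAC]
  | cons c d =>
    by_cases hc : c = ' '
    · -- empty first token: both skip it
      subst hc
      have hB : pvScanB (' ' :: d) true = pvScanB d true := by
        simp [pvScanB, List.isPrefixOf]
      rw [hB, pvScanB_eq_scanAC d]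
      obtain ⟨u, more, hsp⟩ := List.exists_cons_of_ne_nil (pvSplit_ne_nil d)
      simp [pvSplit, pvScanAC, hsp]
    · by_cases hp : (['M','M','S','I',' '].isPrefixOf (c :: d)) = true
      · -- the current token is exactly "MMSI" and is followed by a space
        obtain ⟨t, ht⟩ : ∃ t, c :: d = 'M' :: 'M' :: 'S' :: 'I' :: ' ' :: t := by
          rw [List.isPrefixOf_iff_prefix] at hp
          obtain ⟨t', ht'⟩ := hp
          exact ⟨t', by rw [← ht']; rfl⟩
        obtain ⟨hc1, hd1⟩ := List.cons.injEq .. |>.mp ht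
        subst hc1; subst hd1
        obtain ⟨u, more, hsp⟩ := List.exists_cons_of_ne_nil (pvSplit_ne_nil t)
        have hu : u = t.takeWhile (· ≠ ' ') := by
          have h := pvSplit_shape t
          rw [hsp] at h
          exact (List.cons.injEq .. |>.mp h).1
        have hA : pvSplit ('M' :: 'M' :: 'S' :: 'I' :: ' ' :: t) = ['M','M','S','I'] :: u :: more := by
          rw [show pvSplit ('M' :: 'M' :: 'S' :: 'I' :: ' ' :: t) = ['M','M','S','I'] :: pvSplit t from rfl, hsp]
        have hBstep : pvScanB ('M' :: 'M' :: 'S' :: 'I' :: ' ' :: t) true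
            = if pvDigitRun t = 9 ∧ (t.length = 9 ∨ t[9]? = some ' ') then some (t.take 9)
              else pvScanB ('M' :: 'S' :: 'I' :: ' ' :: t) false := rfl
        by_cases hchk : pvDigitRun t = 9 ∧ (t.length = 9 ∨ t[9]? = some ' ')
        · -- hit: both return the 9-digit token
          have hiff := (pvCheck_iff t 9).mp (by rw [← pvDigitRun_eq]; exact hchk)
          have hne : u ≠ [] := by
            intro he
            have h9 := hiff.2
            rw [← hu, he] at h9
            simp at h9
          have hall : u.all PySem.Chars.isdigit = true := by rw [hu]; exact hiff.1
          have hlen9 : u.length = 9 := by rw [hu]; exact hiff.2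
          have hdig : PySem.Chars.strIsdigit u = true := by
            simp [PySem.Chars.strIsdigit, hall, hne]
          have htake : t.take 9 = u := by
            rw [hu]; exact pvTake_eq_token t 9 (by rw [← hu]; exact hlen9)
          rw [hBstep, if_pos hchk, hA]
          simp [pvScanAC, hdig, hlen9, htake]
        · -- miss: A skips the "MMSI" token, B walks past it
          have hBrest : pvScanB ('M' :: 'S' :: 'I' :: ' ' :: t) false = pvScanB t true := by
            rw [pvScanB_false]
            rfl
          have hvneg : ¬ (PySem.Chars.strIsdigit u = true ∧ u.length = 9) := by
            rintro ⟨h1, h2⟩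
            apply hchk
            rw [pvDigitRun_eq]
            apply (pvCheck_iff t 9).mpr
            simp [PySem.Chars.strIsdigit] at h1
            exact ⟨by rw [← hu]; exact List.all_eq_true.mpr h1.2, by rw [← hu]; exact h2⟩
          rw [hBstep, if_neg hchk, hBrest, pvScanB_eq_scanAC t, hsp, hA]
          simp only [pvScanAC]
          rw [if_neg (by rintro ⟨-, h1, h2⟩; exact hvneg ⟨h1, h2⟩)]
      · -- ordinary non-"MMSI " position: both skip the first token
        have hB : pvScanB (c :: d) true = pvScanB d false := by
          simp [pvScanB, hp, hc]
        rw [hB, pvScanB_false d]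
        have hAshape := pvSplit_shape (c :: d)
        cases hdw : (c :: d).dropWhile (· ≠ ' ') with
        | nil =>
          -- no space at all: a single token on either side, no candidate
          have hafter : pvAfter d = [] := by
            rw [List.dropWhile_cons, if_pos (by simpa using hc)] at hdw
            unfold pvAfter
            rw [hdw]
          have hA2 : pvSplit (c :: d) = [(c :: d).takeWhile (· ≠ ' ')] := by
            rw [hAshape, hdw]
          rw [hafter, hA2]
          simp [pvScanB, pvScanAC]
        | cons s r =>
          have hs : s = ' ' := by
            have := pvDropWhile_cons_head hdw
            simpa using this
          subst hs
          have hafter : pvAfter d = r := by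
            rw [List.dropWhile_cons, if_pos (by simpa using hc)] at hdw
            unfold pvAfter
            rw [hdw]
          have hA2 : pvSplit (c :: d) = (c :: d).takeWhile (· ≠ ' ') :: pvSplit r := by
            rw [hAshape, hdw]
          rw [hafter, pvScanB_eq_scanAC r, hA2]
          obtain ⟨u, more, hsp⟩ := List.exists_cons_of_ne_nil (pvSplit_ne_nil r)
          rw [hsp]
          simp only [pvScanAC]
          rw [if_neg ?hne]
          case hne =>
            rintro ⟨htok, -⟩
            -- if the first token were "MMSI", the 'MMSI ' prefix test would have fired
            apply hp
            have hcat : (c :: d).takeWhile (· ≠ ' ') ++ (c :: d).dropWhile (· ≠ ' ') = c :: d :=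
              List.takeWhile_append_dropWhile
            rw [hdw, htok] at hcat
            rw [← hcat]
            rw [List.isPrefixOf_iff_prefix]
            exact ⟨r, rfl⟩
  termination_by cs.length
decreasing_by
  · simp_all
  · simp_all; omega
  · have hlen : (List.dropWhile (fun x => decide (x ≠ ' ')) (c :: d)).length ≤ (c :: d).length :=
      List.length_dropWhile_le ..
    rw [hdw] at hlen
    subst hcs
    simp only [List.length_cons] at hlen ⊢
    omega

-- String is always split successfully on the nonempty separator " ".
theorem pvSplitA (f : String) :
    PySem.Str.split? f " " = some ((pvSplit f.toList).map String.ofList) := by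
  have h1 : (" ".toList) = [' '] := by decide
  simp [PySem.Str.split?, PySem.Chars.split?, h1, pvSplitOn_space]

-- ===== VERDICT (by name: the statement is the Claim_ definition above) =====
theorem extract_mmsi_from_filename_spec : Claim_equal_extract_mmsi_from_filename := by
  intro f _
  show extract_mmsi_from_filename f = extract_mmsi_from_filename_alt f
  rw [extract_mmsi_from_filename]
  simp only [pvSplitA, Option.getD_some]
  rw [pvGoA_eq_scanAS _ _ 0 (by simp), pvScanAS_map, ← pvScanB_eq_scanAC]
  rw [extract_mmsi_from_filename_alt]
  cases pvScanB f.toList true <;> simp
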